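-- pv_equiv track=rewrite | github.com/adiens916/NOTE-algorithm | swea/0817 - String/[String] 3. 글자수.py | count_most_char
-- ===== SOURCE A (Python) =====
-- def make_dict(str):
--     d = {}
--     for char in str:
--         d[char] = d.get(char, 0) + 1
--     return d
--
-- def count_most_char(str1, str2):
--     str2_dict = make_dict(str2)
--     most_num = 0
--
--     for char in str1:
--         if char in str2_dict:
--             if most_num < str2_dict[char]:
--                 most_num = str2_dict[char]
--
--     return most_num
-- ===== SOURCE B (Python) =====
-- def count_most_char(str1, str2):
--     # Sort-then-scan: keep only chars of str2 that occur in str1, sort them so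
--     # equal chars become contiguous, and return the length of the longest run.
--     wanted = set(str1)
--     chars = sorted(c for c in str2 if c in wanted)
--     best = run = 0
--     prev = None
--     for c in chars:
--         run = run + 1 if c == prev else 1
--         if run > best:
--             best = run
--         prev = c
--     return best
-- ===== Notes on version B (the rewrite author's own statement) =====
-- stated objective: alternative
-- what changed: B replaces A's frequency-table counting with a sort-then-scan: it filters str2 to the chars occurring in str1, sorts them so equal chars are contiguous, and returns the longest run length; no dict and no per-char lookup remain.
import Mathlib
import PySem

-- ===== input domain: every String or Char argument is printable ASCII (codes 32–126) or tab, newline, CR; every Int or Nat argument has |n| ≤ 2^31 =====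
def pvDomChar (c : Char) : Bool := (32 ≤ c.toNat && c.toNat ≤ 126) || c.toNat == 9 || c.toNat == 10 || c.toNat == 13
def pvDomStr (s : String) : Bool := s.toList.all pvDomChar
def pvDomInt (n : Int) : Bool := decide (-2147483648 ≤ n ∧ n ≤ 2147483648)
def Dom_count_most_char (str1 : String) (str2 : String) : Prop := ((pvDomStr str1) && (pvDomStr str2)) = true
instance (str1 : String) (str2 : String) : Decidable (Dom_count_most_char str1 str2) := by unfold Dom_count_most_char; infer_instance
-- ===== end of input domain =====

-- B replaces A's frequency table by sort-then-scan (longest run of equal chars); objective: alternative.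

-- ===== PORT A =====
-- helper make_dict: d[char] = d.get(char, 0) + 1 over the string's chars
def pvMakeDict (s : String) : PySem.Dict Char Int :=
  s.toList.foldl (fun d c => d.insert c (d.getD c 0 + 1)) PySem.Dict.empty

def count_most_char (str1 : String) (str2 : String) : Int :=
  let str2_dict := pvMakeDict str2
  -- d[char] is guarded by 'char in str2_dict', so getD with default 0 is exact here
  str1.toList.foldl
    (fun most_num c =>
      if str2_dict.contains c then
        if most_num < str2_dict.getD c 0 then str2_dict.getD c 0 else most_num
      else most_num) 0

-- ===== PORT B =====
-- the loop body: run = run + 1 if c == prev else 1; if run > best: best = run; prev = c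
def pvRunStep (st : Int × Int × Option Char) (c : Char) : Int × Int × Option Char :=
  let run := if some c == st.2.2 then st.2.1 + 1 else 1
  let best := if run > st.1 then run else st.1
  (best, run, some c)

def count_most_char_alt (str1 : String) (str2 : String) : Int :=
  let wanted : PySem.Set Char := PySem.Set.ofList str1.toList
  let chars := PySem.List.sorted (str2.toList.filter (fun c => PySem.Set.contains wanted c)) (fun c => c) false
  (chars.foldl pvRunStep (0, 0, none)).1

-- ===== PRECONDITION & SPEC =====
def Spec_count_most_char (str1 : String) (str2 : String) (out : Int) : Prop := out = count_most_char_alt str1 str2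
instance (str1 : String) (str2 : String) (out : Int) : Decidable (Spec_count_most_char str1 str2 out) := by unfold Spec_count_most_char; infer_instance

-- ===== CLAIM =====
def Claim_equal_count_most_char : Prop := ∀ (str1 : String) (str2 : String), Dom_count_most_char str1 str2 → Spec_count_most_char str1 str2 (count_most_char str1 str2)

-- ===== LEMMAS AND PROOFS =====

-- pull the head of a foldl max out
theorem pv_foldl_max_init (xs : List Int) : ∀ (a x : Int), xs.foldl max (max a x) = max x (xs.foldl max a) := by
  induction xs with
  | nil => intro a x; simp only [List.foldl_nil]; omega
  | cons y ys ih =>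
    intro a x
    simp only [List.foldl_cons]
    rw [show max (max a x) y = max (max a y) x from by omega, ih]

theorem pv_foldl_max_cons (x : Int) (xs : List Int) (a : Int) :
    (x :: xs).foldl max a = max x (xs.foldl max a) := by
  simp only [List.foldl_cons]; exact pv_foldl_max_init xs a x

-- absorbing arithmetic shared by the run-lemma cases
theorem pv_max_absorb (b r' gc T : Int) (h1 : r' ≤ gc) (h2 : gc ≤ max r' T) :
    max (max b r') T = max b (max gc T) := by omega

-- A's loop, with the dict resolved to counts, is a running max of counts (needs 0 ≤ acc).
theorem pv_A_loop_eq_max (s2 : List Char) :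
    ∀ (l : List Char) (m : Int), 0 ≤ m →
      l.foldl (fun most_num c =>
        if (PySem.Dict.counter s2).contains c then
          if most_num < (PySem.Dict.counter s2).getD c 0 then (PySem.Dict.counter s2).getD c 0 else most_num
        else most_num) m
      = l.foldl (fun most c => max most ((s2.count c : Int))) m := by
  intro l
  induction l with
  | nil => intro m _; rfl
  | cons c t ih =>
    intro m hm
    simp only [List.foldl_cons]
    rw [PySem.Dict.contains_counter, PySem.Dict.getD_counter]
    by_cases hmem : s2.contains c
    · simp only [hmem, if_true]
      have : (if m < (s2.count c : Int) then (s2.count c : Int) else m) = max m (s2.count c : Int) := by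
        rw [max_comm, max_def]; split_ifs <;> omega
      rw [this]
      exact ih _ (le_trans hm (le_max_left _ _))
    · have hc : ((s2.count c : Int)) = 0 := by
        norm_cast
        rw [List.count_eq_zero]
        simpa [List.contains_iff_mem] using hmem
      simp only [hmem, Bool.false_eq_true, if_false, hc]
      rw [show max m (0 : Int) = m from by omega]
      exact ih _ hm

-- foldl max from 0 only depends on the SET of elements
theorem pv_foldl_max_congr (xs ys : List Int) (a : Int)
    (h : ∀ z, z ∈ xs ↔ z ∈ ys) : xs.foldl max a = ys.foldl max a := by
  apply le_antisymm
  · rcases PySem.List.foldl_max_mem xs a with h1 | h1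
    · rw [h1]; exact (PySem.List.le_foldl_max ys a).1
    · exact (PySem.List.le_foldl_max ys a).2 _ ((h _).mp h1)
  · rcases PySem.List.foldl_max_mem ys a with h1 | h1
    · rw [h1]; exact (PySem.List.le_foldl_max xs a).1
    · exact (PySem.List.le_foldl_max xs a).2 _ ((h _).mpr h1)

-- the candidate max (count of c plus carried run k) is bounded by the tail fold
theorem pv_gc_le (t : List Char) (c : Char) (k : Int) :
    (t.count c : Int) + k ≤ max k ((t.map (fun e => (t.count e : Int) + (if e = c then k else 0))).foldl max 0) := by
  by_cases h : c ∈ t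
  · have hmem : (t.count c : Int) + k ∈ t.map (fun e => (t.count e : Int) + (if e = c then k else 0)) :=
      List.mem_map.mpr ⟨c, h, by simp⟩
    exact le_trans ((PySem.List.le_foldl_max _ 0).2 _ hmem) (le_max_right _ _)
  · have h0 : t.count c = 0 := List.count_eq_zero.mpr h
    rw [h0]; simp

-- the run-scan on a sorted tail, entered with prev = p, best b, run r
theorem pv_run_lemma :
    ∀ (l : List Char) (b r : Int) (p : Char),
      l.Pairwise (· ≤ ·) → (∀ x ∈ l, p ≤ x) → 0 ≤ r → r ≤ b →
      (l.foldl pvRunStep (b, r, some p)).1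
        = max b ((l.map (fun e => (l.count e : Int) + (if e = p then r else 0))).foldl max 0) := by
  intro l
  induction l with
  | nil => intro b r p _ _ h0 hrb; simp only [List.foldl_nil, List.map_nil]; omega
  | cons c t ih =>
    intro b r p hpw hle h0 hrb
    rw [List.pairwise_cons] at hpw
    obtain ⟨hct, htpw⟩ := hpw
    simp only [List.foldl_cons]
    by_cases hcp : c = p
    · subst hcp
      have hstep : pvRunStep (b, r, some c) c = (max b (r + 1), r + 1, some c) := by
        unfold pvRunStep
        simp only [beq_self_eq_true, if_true]
        rw [show (if r + 1 > b then r + 1 else b) = max b (r + 1) from by omega]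
      rw [hstep, ih (max b (r + 1)) (r + 1) c htpw hct (by omega) (le_max_right _ _)]
      have hmap : (c :: t).map (fun e => ((c :: t).count e : Int) + (if e = c then r else 0))
          = (((t.count c : Int) + 1 + r) :: t.map (fun e => (t.count e : Int) + (if e = c then r + 1 else 0))) := by
        simp only [List.map_cons, List.cons.injEq]
        refine ⟨by simp only [List.count_cons_self]; push_cast; ring, ?_⟩
        apply List.map_congr_left
        intro e _
        by_cases he : e = c
        · subst he; simp only [List.count_cons_self]; push_cast; ring
        · rw [List.count_cons_of_ne (fun h => he h.symm), if_neg he, if_neg he]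
      rw [hmap, pv_foldl_max_cons]
      exact pv_max_absorb b (r + 1) ((t.count c : Int) + 1 + r)
        ((t.map (fun e => (t.count e : Int) + (if e = c then r + 1 else 0))).foldl max 0)
        (by omega) (by have := pv_gc_le t c (r + 1); omega)
    · have hpc : p < c := lt_of_le_of_ne (hle c (List.mem_cons_self)) (fun h => hcp h.symm)
      have hstep : pvRunStep (b, r, some p) c = (max b 1, 1, some c) := by
        unfold pvRunStep
        rw [show (some c == some p) = false from by simp [hcp]]
        simp only [Bool.false_eq_true, if_false]
        rw [show (if (1 : Int) > b then (1 : Int) else b) = max b 1 from by omega]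
      rw [hstep, ih (max b 1) 1 c htpw hct (by omega) (le_max_right _ _)]
      have hnep : ∀ e ∈ c :: t, e ≠ p := by
        intro e he
        rcases List.mem_cons.mp he with rfl | ht
        · exact fun h => absurd h hcp
        · exact fun h => absurd (h ▸ hct e ht) (not_le.mpr hpc)
      have hmap : (c :: t).map (fun e => ((c :: t).count e : Int) + (if e = p then r else 0))
          = (((t.count c : Int) + 1) :: t.map (fun e => (t.count e : Int) + (if e = c then 1 else 0))) := by
        simp only [List.map_cons, List.cons.injEq]
        refine ⟨by rw [List.count_cons_self, if_neg hcp]; push_cast; ring, ?_⟩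
        apply List.map_congr_left
        intro e he
        rw [if_neg (hnep e (List.mem_cons_of_mem c he))]
        by_cases hec : e = c
        · subst hec; rw [List.count_cons_self, if_pos rfl]; push_cast; ring
        · rw [List.count_cons_of_ne (fun h => hec h.symm), if_neg hec]
      rw [hmap, pv_foldl_max_cons]
      exact pv_max_absorb b 1 ((t.count c : Int) + 1)
        ((t.map (fun e => (t.count e : Int) + (if e = c then 1 else 0))).foldl max 0)
        (by omega) (by have := pv_gc_le t c 1; omega)

-- the run-scan from the initial state computes the max self-count
theorem pv_run_scan_eq_maxcount (l : List Char) (hs : l.Pairwise (· ≤ ·)) :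
    (l.foldl pvRunStep (0, 0, none)).1
      = (l.map (fun e => (l.count e : Int))).foldl max 0 := by
  cases l with
  | nil => rfl
  | cons c t =>
    rw [List.pairwise_cons] at hs
    obtain ⟨hct, htpw⟩ := hs
    simp only [List.foldl_cons]
    have hstep : pvRunStep (0, 0, none) c = (1, 1, some c) := by rfl
    rw [hstep, pv_run_lemma t 1 1 c htpw hct (by omega) le_rfl]
    have hmap : (c :: t).map (fun e => ((c :: t).count e : Int))
        = (((t.count c : Int) + 1) :: t.map (fun e => (t.count e : Int) + (if e = c then 1 else 0))) := by
      simp only [List.map_cons, List.cons.injEq]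
      refine ⟨by rw [List.count_cons_self]; push_cast; ring, ?_⟩
      apply List.map_congr_left
      intro e _
      by_cases hec : e = c
      · subst hec; rw [List.count_cons_self, if_pos rfl]; push_cast; ring
      · rw [List.count_cons_of_ne (fun h => hec h.symm), if_neg hec]; ring
    rw [hmap, pv_foldl_max_cons]
    have := pv_gc_le t c 1
    omega

-- the max self-count of (filter (∈ s1) s2) is the max over chars of s1 of s2-counts
theorem pv_filter_maxcount (s1 s2 : List Char) :
    (((s2.filter (fun c => PySem.Set.contains (PySem.Set.ofList s1) c)).map
        (fun e => ((s2.filter (fun c => PySem.Set.contains (PySem.Set.ofList s1) c)).count e : Int))).foldl max 0)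
      = (s1.map (fun c => (s2.count c : Int))).foldl max 0 := by
  have hp : ∀ c, PySem.Set.contains (PySem.Set.ofList s1) c = true ↔ c ∈ s1 := by
    intro c; rw [PySem.Set.contains_iff, PySem.Set.mem_ofList]
  set F := s2.filter (fun c => PySem.Set.contains (PySem.Set.ofList s1) c) with hF
  have hcountF : ∀ e, e ∈ s1 → F.count e = s2.count e := by
    intro e he
    rw [hF, List.count_filter (by simpa using (hp e).mpr he)]
  apply le_antisymm
  · rcases PySem.List.foldl_max_mem (F.map (fun e => (F.count e : Int))) 0 with h1 | h1
    · rw [h1]; exact (PySem.List.le_foldl_max _ 0).1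
    · obtain ⟨e, heF, hz⟩ := List.mem_map.mp h1
      have he1 : e ∈ s1 := (hp e).mp (List.mem_filter.mp heF).2
      have : (s2.count e : Int) ∈ s1.map (fun c => (s2.count c : Int)) := List.mem_map.mpr ⟨e, he1, rfl⟩
      rw [← hz, hcountF e he1]
      exact (PySem.List.le_foldl_max _ 0).2 _ this
  · rcases PySem.List.foldl_max_mem (s1.map (fun c => (s2.count c : Int))) 0 with h1 | h1
    · rw [h1]; exact (PySem.List.le_foldl_max _ 0).1
    · obtain ⟨c, hc1, hz⟩ := List.mem_map.mp h1
      rw [← hz]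
      by_cases h0 : s2.count c = 0
      · rw [h0]; exact_mod_cast (PySem.List.le_foldl_max _ 0).1
      · have hc2 : c ∈ s2 := List.count_pos_iff.mp (Nat.pos_of_ne_zero h0)
        have hcF : c ∈ F := List.mem_filter.mpr ⟨hc2, by simpa using (hp c).mpr hc1⟩
        have : (F.count c : Int) ∈ F.map (fun e => (F.count e : Int)) := List.mem_map.mpr ⟨c, hcF, rfl⟩
        rw [← hcountF c hc1]
        exact (PySem.List.le_foldl_max _ 0).2 _ this

-- the max self-count is a permutation invariant
theorem pv_maxself_perm (l l' : List Char) (hp : l.Perm l') :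
    (l.map (fun e => (l.count e : Int))).foldl max 0
      = (l'.map (fun e => (l'.count e : Int))).foldl max 0 := by
  apply pv_foldl_max_congr
  intro z
  constructor
  · intro hz
    obtain ⟨e, he, rfl⟩ := List.mem_map.mp hz
    exact List.mem_map.mpr ⟨e, hp.mem_iff.mp he, by rw [hp.count_eq]⟩
  · intro hz
    obtain ⟨e, he, rfl⟩ := List.mem_map.mp hz
    exact List.mem_map.mpr ⟨e, hp.mem_iff.mpr he, by rw [hp.count_eq]⟩

-- ===== VERDICT =====
theorem count_most_char_spec : Claim_equal_count_most_char := by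
  intro str1 str2 _
  unfold Spec_count_most_char count_most_char count_most_char_alt pvMakeDict
  rw [PySem.Dict.foldl_insert_getD_add_one_eq_counter]
  rw [pv_A_loop_eq_max str2.toList str1.toList 0 le_rfl]
  rw [← List.foldl_map]
  rw [pv_run_scan_eq_maxcount _ (PySem.List.sorted_pairwise _ _)]
  rw [pv_maxself_perm _ _ (PySem.List.sorted_perm _ _ _)]
  rw [pv_filter_maxcount]
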